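-- pv_equiv track=rewrite | github.com/CharlineMosquera/inter-interview-test | highest_value_palindrome.py | cambios_necesarios
-- ===== SOURCE A (Python) =====
-- def cambios_necesarios(s, n):
--     """Esta funcion calcula cuantos digitos se deben
--     modificar en s para obtener un palindromo"""
--     cambios = 0
--     index = 0
--
--     # Se recorre la lista de caracteres
--     while index < n // 2:
--         # Si los caracteres simetricos son diferentes
--         # Se incrementa la variable cambios
--         if s[index] != s[n - index - 1]:
--             cambios += 1
--         # Se aumenta el indice hasta llegar al centro de la lista
--         index += 1
--     return cambios
-- ===== SOURCE B (Python) =====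
-- def cambios_necesarios(s, n):
--     """Reverse-and-halve: compare the n-character window position-wise with
--     its own reversal; every mismatched symmetric pair is counted twice
--     (the middle of an odd window matches itself), so halve the total."""
--     w = s[:max(n, 0)]
--     r = w[::-1]
--     return sum(1 for a, b in zip(w, r) if a != b) // 2
-- ===== Notes on version B (the rewrite author's own statement) =====
-- stated objective: idiomatic
-- what changed: B does not scan inward over half the window: it reverses the whole window, counts positions where the window disagrees with its reversal (each bad pair counted twice, the odd middle never), and integer-divides by 2.
import Mathlib
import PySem

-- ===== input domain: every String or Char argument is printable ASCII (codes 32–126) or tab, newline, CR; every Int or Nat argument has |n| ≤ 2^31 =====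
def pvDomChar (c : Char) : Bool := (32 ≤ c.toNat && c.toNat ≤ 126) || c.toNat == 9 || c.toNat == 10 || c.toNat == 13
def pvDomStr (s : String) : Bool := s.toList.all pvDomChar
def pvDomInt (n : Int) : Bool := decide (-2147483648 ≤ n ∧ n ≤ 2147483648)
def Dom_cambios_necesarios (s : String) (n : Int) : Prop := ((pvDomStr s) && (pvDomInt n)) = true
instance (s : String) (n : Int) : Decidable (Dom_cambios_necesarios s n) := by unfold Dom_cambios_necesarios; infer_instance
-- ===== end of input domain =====

-- B replaces A's inward two-index half-scan by reverse-and-halve: compare the whole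
-- window with its own reversal, count all mismatching positions and divide by 2.


-- ===== PORT A =====
-- while index < n // 2: if s[index] != s[n-index-1]: cambios += 1; index += 1
-- (pyGetD is exact where the index is in range; Pre_ excludes the IndexError inputs)
def cambios_necesarios (s : String) (n : Int) : Int :=
  let cs := s.toList
  (PySem.List.pyRange 0 (PySem.Int.floordiv n 2) 1).foldl
    (fun cambios index =>
      if PySem.List.pyGetD cs index ' ' ≠ PySem.List.pyGetD cs (n - index - 1) ' '
      then cambios + 1 else cambios) 0

-- ===== PORT B =====
-- w = s[:max(n,0)]; r = w[::-1]; sum(1 for a,b in zip(w,r) if a != b) // 2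
def cambios_necesarios_alt (s : String) (n : Int) : Int :=
  let w := PySem.List.slice s.toList none (some (max n 0))
  let r := w.reverse
  PySem.Int.floordiv
    ((w.zip r).foldl (fun acc p => if p.1 ≠ p.2 then acc + 1 else acc) 0) 2

-- ===== PRECONDITION & SPEC =====
-- Pre_ excludes exactly the inputs where A raises IndexError: n ≥ 2 together with n > len(s).
def Pre_cambios_necesarios (s : String) (n : Int) : Prop :=
  n < 2 ∨ n ≤ (s.toList.length : Int)
instance (s : String) (n : Int) : Decidable (Pre_cambios_necesarios s n) := by
  unfold Pre_cambios_necesarios; infer_instance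
def pvWitness_cambios_necesarios : String × Int := ("abca", 4)

def Spec_cambios_necesarios (s : String) (n : Int) (out : Int) : Prop :=
  out = cambios_necesarios_alt s n
instance (s : String) (n : Int) (out : Int) : Decidable (Spec_cambios_necesarios s n out) := by
  unfold Spec_cambios_necesarios; infer_instance

-- ===== CLAIM (what is proved, stated in full; the proofs are below) =====
def Claim_equal_cambios_necesarios : Prop :=
  ∀ (s : String) (n : Int), Dom_cambios_necesarios s n → Pre_cambios_necesarios s n →
    Spec_cambios_necesarios s n (cambios_necesarios s n)

-- ===== LEMMAS AND PROOFS =====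

theorem foldl_if_count (cs : List Char) (n : Int) (l : List Int) (c : Int) :
    l.foldl (fun cambios index =>
      if PySem.List.pyGetD cs index ' ' ≠ PySem.List.pyGetD cs (n - index - 1) ' '
      then cambios + 1 else cambios) c
    = c + l.countP (fun index =>
        PySem.List.pyGetD cs index ' ' ≠ PySem.List.pyGetD cs (n - index - 1) ' ') := by
  induction l generalizing c with
  | nil => simp
  | cons x xs ih =>
    rw [List.foldl_cons, ih, List.countP_cons]
    by_cases h : PySem.List.pyGetD cs x ' ' = PySem.List.pyGetD cs (n - x - 1) ' '
    · simp [h]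
    · simp [h]; omega

theorem foldl_if_count_pairs (l : List (Char × Char)) (c : Int) :
    l.foldl (fun acc p => if p.1 ≠ p.2 then acc + 1 else acc) c
      = c + l.countP (fun p => p.1 ≠ p.2) := by
  induction l generalizing c with
  | nil => simp
  | cons x xs ih =>
    rw [List.foldl_cons, ih, List.countP_cons]
    by_cases h : x.1 = x.2
    · simp [h]
    · simp [h]; ring

-- the window zipped with its own reversal, as pairs indexed by position
theorem zip_self_reverse (w : List Char) :
    w.zip w.reverse
      = (List.range w.length).map
          (fun k => (w.getD k ' ', w.getD (w.length - 1 - k) ' ')) := by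
  apply List.ext_getElem
  · simp
  · intro i h1 h2
    have hiw : i < w.length := by simpa using h2
    have h2w : w.length - 1 - i < w.length := by omega
    rw [List.getElem_zip]
    simp only [List.getElem_map, List.getElem_range, List.getElem_reverse]
    rw [List.getD_eq_getElem w ' ' hiw, List.getD_eq_getElem w ' ' h2w]

-- reversing the index range preserves a count
theorem map_rev_range (u : Nat) :
    (List.range u).map (fun j => u - 1 - j) = (List.range u).reverse := by
  apply List.ext_getElem
  · simp
  · intro i h1 h2
    have hib : i < u := by simpa using h2
    simp only [List.getElem_map, List.getElem_range, List.getElem_reverse, List.length_range]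

-- symmetric mismatch count over the whole window-vs-reverse zip is twice the half count
theorem countP_symm (w : List Char) :
    ((List.range w.length).map
        (fun k => (w.getD k ' ', w.getD (w.length - 1 - k) ' '))).countP
        (fun p => p.1 ≠ p.2)
      = 2 * (List.range (w.length / 2)).countP
        (fun k => w.getD k ' ' ≠ w.getD (w.length - 1 - k) ' ') := by
  set L := w.length with hL
  set g : Nat → Bool :=
    fun k => decide (w.getD k ' ' ≠ w.getD (L - 1 - k) ' ') with hg
  have hcomp : ((fun p : Char × Char => decide (p.1 ≠ p.2)) ∘
      (fun k => (w.getD k ' ', w.getD (L - 1 - k) ' '))) = g := by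
    funext k; simp [hg]
  rw [List.countP_map, hcomp]
  show (List.range L).countP g = 2 * (List.range (L / 2)).countP g
  have hsym : ∀ k, k < L → g k = g (L - 1 - k) := by
    intro k hk
    have h : L - 1 - (L - 1 - k) = k := by omega
    simp only [hg, h, decide_eq_decide]
    exact not_congr eq_comm
  set u := L - L / 2 with hu
  have hsplit : List.range L = List.range (L / 2) ++ (List.range u).map (fun j => L / 2 + j) := by
    nth_rewrite 1 [show L = L / 2 + u from by omega]
    exact List.range_add
  have hupper : ((List.range u).map (fun j => L / 2 + j)).countP g
      = (List.range u).countP g := by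
    rw [List.countP_map]
    have h1 : (List.range u).countP (g ∘ fun j => L / 2 + j)
        = (List.range u).countP (g ∘ fun j => u - 1 - j) := by
      apply List.countP_congr
      intro j hj
      have hju : j < u := List.mem_range.mp hj
      have hlt : L / 2 + j < L := by omega
      have he : L - 1 - (L / 2 + j) = u - 1 - j := by omega
      simp only [Function.comp]
      rw [hsym (L / 2 + j) hlt, he]
    rw [h1, ← List.countP_map, map_rev_range, List.countP_reverse]
  rw [hsplit, List.countP_append, hupper]
  rcases Nat.even_or_odd L with ⟨t, ht⟩ | ⟨t, ht⟩
  · rw [show u = L / 2 from by omega]; ring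
  · have h1 : u = L / 2 + 1 := by omega
    have hmid : g (L / 2) = false := by
      have : L - 1 - L / 2 = L / 2 := by omega
      simp [hg, this]
    rw [h1, List.range_succ, List.countP_append]
    simp [hmid]; ring

theorem cambios_eq (s : String) (n : Int)
    (hpre : Pre_cambios_necesarios s n) :
    cambios_necesarios s n = cambios_necesarios_alt s n := by
  simp only [cambios_necesarios, cambios_necesarios_alt]
  set cs := s.toList with hcs
  rw [zip_self_reverse, foldl_if_count_pairs, countP_symm,
    PySem.List.pyRange_one, foldl_if_count]
  simp only [zero_add, List.countP_map]
  by_cases hn : n ≤ 1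
  · -- loop is empty and the window has at most one character: both sides are 0
    have hm : (PySem.Int.floordiv n 2 - 0).toNat = 0 := by
      rw [PySem.Int.floordiv_eq_ediv_of_pos (by omega)]; omega
    have hw : (PySem.List.slice cs none (some (max n 0))).length ≤ 1 := by
      rw [show max n 0 = ((n.toNat : Nat) : Int) from by omega, PySem.List.slice_to_natCast]
      simp; omega
    have hhalf : (PySem.List.slice cs none (some (max n 0))).length / 2 = 0 := by omega
    rw [hm, hhalf]
    simp [PySem.Int.floordiv]
  · -- 2 ≤ n ≤ len s
    have h2 : 2 ≤ n := by omega
    have hnL : n ≤ (cs.length : Int) := by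
      rcases hpre with h | h
      · omega
      · exact h
    set nn := n.toNat with hnn
    set m := nn / 2 with hmdef
    have hA : (PySem.Int.floordiv n 2 - 0).toNat = m := by
      rw [PySem.Int.floordiv_eq_ediv_of_pos (by omega)]; omega
    have hw : PySem.List.slice cs none (some (max n 0)) = cs.take nn := by
      rw [show max n 0 = ((nn : Nat) : Int) from by omega, PySem.List.slice_to_natCast]
    rw [hA, hw]
    set w := cs.take nn with hwdef
    have hwl : w.length = nn := by
      simp [hwdef]
      omega
    rw [hwl]
    -- the two countP's agree pointwise on range m
    have hcount : (List.range m).countP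
          ((fun index => decide (PySem.List.pyGetD cs index ' '
              ≠ PySem.List.pyGetD cs (n - index - 1) ' ')) ∘ (fun k : Nat => (k : Int)))
        = (List.range m).countP
          (fun k => w.getD k ' ' ≠ w.getD (nn - 1 - k) ' ') := by
      apply List.countP_congr
      intro k hk
      simp only [List.mem_range] at hk
      have hkw : k < w.length := by omega
      have hkc : k < cs.length := by omega
      have h2w : nn - 1 - k < w.length := by omega
      have h2c : nn - 1 - k < cs.length := by omega
      have e2 : n - (k : Int) - 1 = ((nn - 1 - k : Nat) : Int) := by omega
      have e4 : w[k]? = cs[k]? := by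
        rw [List.getElem?_eq_getElem hkw, List.getElem?_eq_getElem hkc]
        simp [hwdef]
      have e5 : w[nn - 1 - k]? = cs[nn - 1 - k]? := by
        rw [List.getElem?_eq_getElem h2w, List.getElem?_eq_getElem h2c]
        simp [hwdef]
      simp [Function.comp, e2, List.getD, e4, e5]
    rw [hcount, ← hmdef]
    rw [PySem.Int.floordiv_eq_ediv_of_pos (by omega)]
    push_cast
    omega

-- ===== VERDICT (by name: the statement is the Claim_ definition above) =====
theorem cambios_necesarios_spec : Claim_equal_cambios_necesarios := by
  intro s n _ hpre
  unfold Spec_cambios_necesarios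
  exact cambios_eq s n hpre
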